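-- pv_equiv track=rewrite | github.com/FI-23LevkivskaElsa/SROM | Laba1/Lab1.py | long_add
-- ===== SOURCE A (Python) =====
-- def long_add(num1, num2, base=2**32):
--     n = max(len(num1), len(num2))
--     k = abs(len(num1) - len(num2))
--     if len(num1) > len(num2):
--         num2 = num2 + [0] * k
--     if len(num1) < len(num2):
--         num1 = num1 + [0] * k
--     C = []
--     carry = 0
--     for i in range(n):
--         temp = num1[i] + num2[i] + carry
--         C.append(temp % base)
--         carry = temp // base
--     return C
-- ===== SOURCE B (Python) =====
-- def long_add(num1, num2, base=2**32):
--     # Reconstruct the integer values, add with Python big ints, then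
--     # re-extract exactly max(len(num1), len(num2)) base-digits (the final
--     # overflow carry is dropped, as in the digit-wise version).
--     total = 0
--     p = 1
--     for d in num1:
--         total += d * p
--         p *= base
--     p = 1
--     for d in num2:
--         total += d * p
--         p *= base
--     C = []
--     for _ in range(max(len(num1), len(num2))):
--         C.append(total % base)
--         total //= base
--     return C
-- ===== Notes on version B (the rewrite author's own statement) =====
-- stated objective: alternative
-- what changed: Instead of padding both lists and running a digit-wise carry loop, B reconstructs the two integer values by Horner-style accumulation, adds them as Python big ints, and re-extracts exactly max(len(num1),len(num2)) base-digits with % and //, dropping the final carry as A does; slower on very large inputs.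
import Mathlib
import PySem

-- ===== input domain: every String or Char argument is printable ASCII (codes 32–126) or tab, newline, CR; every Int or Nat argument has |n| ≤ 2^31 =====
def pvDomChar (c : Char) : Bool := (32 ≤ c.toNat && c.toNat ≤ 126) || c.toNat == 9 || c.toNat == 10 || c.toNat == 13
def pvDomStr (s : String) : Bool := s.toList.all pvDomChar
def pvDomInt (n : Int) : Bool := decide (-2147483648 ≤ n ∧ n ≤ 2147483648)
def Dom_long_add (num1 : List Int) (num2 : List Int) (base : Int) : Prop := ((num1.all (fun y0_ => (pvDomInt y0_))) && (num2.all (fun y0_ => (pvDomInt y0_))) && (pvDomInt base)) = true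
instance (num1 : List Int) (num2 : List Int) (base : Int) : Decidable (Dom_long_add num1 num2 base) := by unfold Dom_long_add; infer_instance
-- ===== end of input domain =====

-- B re-implements A's digit-wise carry addition by reconstructing the integer
-- values, adding them, and re-extracting exactly max(len(num1),len(num2))
-- base-digits (alternative algorithm, similar cost).

-- ===== PORT A =====
def long_add (num1 : List Int) (num2 : List Int) (base : Int) : List Int :=
  let n : Int := max (num1.length : Int) (num2.length : Int)
  let k : Nat := ((num1.length : Int) - (num2.length : Int)).natAbs
  let num2 := if num1.length > num2.length then num2 ++ List.replicate k 0 else num2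
  let num1 := if num1.length < num2.length then num1 ++ List.replicate k 0 else num1
  let st := (PySem.List.pyRange 0 n 1).foldl
    (fun (st : List Int × Int) i =>
      let temp := PySem.List.pyGetD num1 i 0 + PySem.List.pyGetD num2 i 0 + st.2
      (st.1 ++ [PySem.Int.mod temp base], PySem.Int.floordiv temp base))
    ([], 0)
  st.1

-- ===== PORT B =====
def long_add_alt (num1 : List Int) (num2 : List Int) (base : Int) : List Int :=
  let s1 := num1.foldl (fun (s : Int × Int) d => (s.1 + d * s.2, s.2 * base)) (0, 1)
  let s2 := num2.foldl (fun (s : Int × Int) d => (s.1 + d * s.2, s.2 * base)) (s1.1, 1)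
  let st := (PySem.List.pyRange 0 (max (num1.length : Int) (num2.length : Int)) 1).foldl
    (fun (st : List Int × Int) _ =>
      (st.1 ++ [PySem.Int.mod st.2 base], PySem.Int.floordiv st.2 base))
    ([], s2.1)
  st.1

-- ===== PRECONDITION & SPEC =====
-- Pre_ excludes only base = 0 with a nonempty input, where A's '%' raises ZeroDivisionError.
def Pre_long_add (num1 : List Int) (num2 : List Int) (base : Int) : Prop :=
  base ≠ 0 ∨ (num1 = [] ∧ num2 = [])
instance (num1 : List Int) (num2 : List Int) (base : Int) : Decidable (Pre_long_add num1 num2 base) := by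
  unfold Pre_long_add; infer_instance
def pvWitness_long_add : List Int × List Int × Int := ([3, 5], [9], 10)

def Spec_long_add (num1 : List Int) (num2 : List Int) (base : Int) (out : List Int) : Prop := out = long_add_alt num1 num2 base
instance (num1 : List Int) (num2 : List Int) (base : Int) (out : List Int) : Decidable (Spec_long_add num1 num2 base out) := by unfold Spec_long_add; infer_instance

-- ===== CLAIM (what is proved, stated in full; the proofs are below) =====
def Claim_equal_long_add : Prop := ∀ (num1 : List Int) (num2 : List Int) (base : Int), Dom_long_add num1 num2 base → Pre_long_add num1 num2 base → Spec_long_add num1 num2 base (long_add num1 num2 base)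

-- ===== LEMMAS AND PROOFS =====

-- value of a digit list, least-significant digit first
def pvVal (base : Int) : List Int → Int
  | [] => 0
  | d :: ds => d + base * pvVal base ds

-- A's carry loop as a structural recursion over the per-position sums
def pvCarry (base : Int) : List Int → Int → List Int
  | [], _ => []
  | x :: xs, c =>
    PySem.Int.mod (x + c) base :: pvCarry base xs (PySem.Int.floordiv (x + c) base)

-- B's digit-extraction loop as a structural recursion
def pvDigits (base : Int) : Nat → Int → List Int
  | 0, _ => []
  | n + 1, t => PySem.Int.mod t base :: pvDigits base n (PySem.Int.floordiv t base)

theorem pvCarry_fold (base : Int) (s : List Int) (C : List Int) (c : Int) :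
    (s.foldl (fun (st : List Int × Int) x =>
        (st.1 ++ [PySem.Int.mod (x + st.2) base], PySem.Int.floordiv (x + st.2) base))
      (C, c)).1 = C ++ pvCarry base s c := by
  induction s generalizing C c with
  | nil => simp [pvCarry]
  | cons x xs ih => simp [pvCarry, ih]

theorem pvDigits_fold {α : Type} (base : Int) (l : List α) (C : List Int) (t : Int) :
    (l.foldl (fun (st : List Int × Int) _ =>
        (st.1 ++ [PySem.Int.mod st.2 base], PySem.Int.floordiv st.2 base))
      (C, t)).1 = C ++ pvDigits base l.length t := by
  induction l generalizing C t with
  | nil => simp [pvDigits]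
  | cons x xs ih => simp [pvDigits, ih]

theorem pvHorner (base : Int) (xs : List Int) (t p : Int) :
    (xs.foldl (fun (s : Int × Int) d => (s.1 + d * s.2, s.2 * base)) (t, p)).1
      = t + p * pvVal base xs := by
  induction xs generalizing t p with
  | nil => simp [pvVal]
  | cons x xs ih => simp [pvVal, ih]; ring

theorem pvVal_pad (base : Int) (xs : List Int) (k : Nat) :
    pvVal base (xs ++ List.replicate k 0) = pvVal base xs := by
  induction xs with
  | nil =>
    simp only [List.nil_append]
    induction k with
    | zero => simp [pvVal]
    | succ m ih => simp [List.replicate_succ, pvVal, ih]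
  | cons x xs ih => simp [pvVal, ih]

theorem pvVal_zip (base : Int) (xs ys : List Int) (h : xs.length = ys.length) :
    pvVal base (List.zipWith (· + ·) xs ys) = pvVal base xs + pvVal base ys := by
  induction xs generalizing ys with
  | nil => cases ys with
    | nil => simp [pvVal]
    | cons y ys => simp at h
  | cons x xs ih => cases ys with
    | nil => simp at h
    | cons y ys =>
      simp only [List.zipWith_cons_cons, pvVal]
      rw [ih ys (by simpa using h)]
      ring

theorem pvMain (base : Int) (hb : base ≠ 0) (s : List Int) (c : Int) :
    pvCarry base s c = pvDigits base s.length (pvVal base s + c) := by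
  induction s generalizing c with
  | nil => simp [pvCarry, pvVal, pvDigits]
  | cons x xs ih =>
    simp only [pvCarry, pvVal, pvDigits, List.length_cons, PySem.Int.mod, PySem.Int.floordiv]
    have h1 : x + base * pvVal base xs + c = (x + c) + pvVal base xs * base := by ring
    rw [h1, Int.add_mul_fmod_self_right, Int.add_mul_fdiv_right _ _ hb]
    have := ih (Int.fdiv (x + c) base)
    rw [this, Int.add_comm (pvVal base xs) ((x + c).fdiv base)]

theorem pvGetD_zip_add (xs ys : List Int) (h : xs.length = ys.length) (i : Int)
    (hi : 0 ≤ i) :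
    PySem.List.pyGetD xs i 0 + PySem.List.pyGetD ys i 0
      = PySem.List.pyGetD (List.zipWith (· + ·) xs ys) i 0 := by
  rw [PySem.List.pyGetD_of_nonneg _ _ hi, PySem.List.pyGetD_of_nonneg _ _ hi,
      PySem.List.pyGetD_of_nonneg _ _ hi]
  rcases lt_or_ge i.toNat xs.length with hk | hk
  · rw [List.getD_eq_getElem _ _ hk, List.getD_eq_getElem _ _ (by omega),
        List.getD_eq_getElem _ _ (by simp; omega), List.getElem_zipWith]
  · rw [List.getD_eq_default _ _ hk, List.getD_eq_default _ _ (by omega),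
        List.getD_eq_default _ _ (by simp; omega)]
    simp

-- ===== VERDICT (by name: the statement is the Claim_ definition above) =====
theorem long_add_spec : Claim_equal_long_add := by
  intro num1 num2 base _ hpre
  unfold Spec_long_add long_add long_add_alt
  rcases hpre with hb | ⟨h1, h2⟩
  · simp only []
    set p2 : List Int := if num1.length > num2.length then
        num2 ++ List.replicate ((num1.length : Int) - (num2.length : Int)).natAbs 0 else num2 with hp2
    set p1 : List Int := if num1.length < p2.length then
        num1 ++ List.replicate ((num1.length : Int) - (num2.length : Int)).natAbs 0 else num1 with hp1
    have hlen : p1.length = p2.length ∧ p1.length = max num1.length num2.length := by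
      rw [hp1, hp2]
      rcases Nat.lt_trichotomy num1.length num2.length with h | h | h <;>
        split_ifs <;> simp_all [List.length_append, List.length_replicate] <;> omega
    set s : List Int := List.zipWith (· + ·) p1 p2 with hs
    have hslen : s.length = max num1.length num2.length := by
      rw [hs]; simp [List.length_zipWith]; omega
    have hn : max (num1.length : Int) (num2.length : Int) = (s.length : Int) := by
      rw [hslen]; push_cast; omega
    -- A's indexed loop = loop over the zipped per-position sums
    rw [hn, PySem.List.foldl_congr_mem _ _
      (fun (st : List Int × Int) i =>
        (st.1 ++ [PySem.Int.mod (PySem.List.pyGetD s i 0 + st.2) base],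
         PySem.Int.floordiv (PySem.List.pyGetD s i 0 + st.2) base)) _
      (by
        intro acc x hx
        have hx0 : 0 ≤ x := (PySem.List.mem_pyRange_one.mp hx).1
        rw [pvGetD_zip_add p1 p2 hlen.1 x hx0]),
      PySem.List.foldl_pyRange_zero_pyGetD' s 0
        (fun (st : List Int × Int) x =>
          (st.1 ++ [PySem.Int.mod (x + st.2) base], PySem.Int.floordiv (x + st.2) base)) ([], 0)]
    rw [pvCarry_fold, pvMain base hb, pvDigits_fold, pvHorner, pvHorner]
    simp only [List.nil_append, PySem.List.length_pyRange_one]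
    rw [hs, pvVal_zip base p1 p2 hlen.1]
    have hv1 : pvVal base p1 = pvVal base num1 := by
      rw [hp1]; split_ifs with h
      · exact pvVal_pad base num1 _
      · rfl
    have hv2 : pvVal base p2 = pvVal base num2 := by
      rw [hp2]; split_ifs with h
      · exact pvVal_pad base num2 _
      · rfl
    rw [hv1, hv2]
    congr 1
    omega
  · subst h1; subst h2
    simp [PySem.List.pyRange_one_eq_nil]
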